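-- pv_equiv track=rewrite | github.com/jih3508/Study-Algorithm | Python/Fast Campus Algorithm/실전 코딩테스트 문제풀이/Ch02/The candy war.py | teacher
-- ===== SOURCE A (Python) =====
-- def teacher(N, candy):
--     tmp_list = [0 for i in range(N)]
--     for idx in range(N):
--         if candy[idx] % 2:
--             candy[idx] += 1
--         tmp_list[(idx + 1) % N] = candy[idx] // 2
--         candy[idx] //= 2
--
--     for idx in range(N):
--         candy[idx] += tmp_list[idx]
--
--     return candy
-- ===== SOURCE B (Python) =====
-- def teacher(N, candy):
--     if N <= 0:
--         return candy
--     # Single pass with a carry: prime it with the last giver's rounded half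
--     # (the circular wrap), then overwrite each student in place with their own
--     # rounded half plus the half carried over from the previous student.
--     carry = (candy[N - 1] + candy[N - 1] % 2) // 2
--     for i in range(N):
--         h = (candy[i] + candy[i] % 2) // 2
--         candy[i] = h + carry
--         carry = h
--     return candy
-- ===== Notes on version B (the rewrite author's own statement) =====
-- stated objective: simpler
-- what changed: Replaces A's two staged passes and preallocated tmp_list transfer array (written at (idx+1)%N, then added back in a second loop) by a single pass with one scalar carry accumulator primed with the last student's rounded half, with no auxiliary list at all.
import Mathlib
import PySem

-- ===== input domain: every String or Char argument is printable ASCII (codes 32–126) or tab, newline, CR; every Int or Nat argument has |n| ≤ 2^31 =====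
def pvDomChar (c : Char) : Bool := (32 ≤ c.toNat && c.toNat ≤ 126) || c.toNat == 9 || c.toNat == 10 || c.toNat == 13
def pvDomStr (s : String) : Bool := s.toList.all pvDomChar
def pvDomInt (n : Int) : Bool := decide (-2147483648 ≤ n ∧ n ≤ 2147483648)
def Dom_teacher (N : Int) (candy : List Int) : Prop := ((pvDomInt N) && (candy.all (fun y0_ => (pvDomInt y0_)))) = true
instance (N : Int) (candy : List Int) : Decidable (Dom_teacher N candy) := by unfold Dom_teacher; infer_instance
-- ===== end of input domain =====

-- B replaces A's two staged passes over an O(N) tmp_list transfer array by a single pass with one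
-- scalar carry accumulator (objective: simpler, O(1) extra space). Both Pythons mutate candy in
-- place; the equivalence proved here is about the return value only.

-- ===== PORT A =====
-- loop body of A's first 'for idx in range(N)' (state = (candy, tmp_list))
def teacherStep1 (N : Int) (st : List Int × List Int) (idx : Int) : List Int × List Int :=
  let candy := st.1
  let tmp := st.2
  let candy := if PySem.Int.mod (PySem.List.pyGetD candy idx 0) 2 ≠ 0
               then PySem.List.pySetD candy idx (PySem.List.pyGetD candy idx 0 + 1) else candy
  let tmp := PySem.List.pySetD tmp (PySem.Int.mod (idx + 1) N)
               (PySem.Int.floordiv (PySem.List.pyGetD candy idx 0) 2)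
  let candy := PySem.List.pySetD candy idx (PySem.Int.floordiv (PySem.List.pyGetD candy idx 0) 2)
  (candy, tmp)

-- loop body of A's second 'for idx in range(N)'
def teacherStep2 (tmp : List Int) (candy : List Int) (idx : Int) : List Int :=
  PySem.List.pySetD candy idx (PySem.List.pyGetD candy idx 0 + PySem.List.pyGetD tmp idx 0)

def teacher (N : Int) (candy : List Int) : List Int :=
  let tmp_list : List Int := (PySem.List.pyRange 0 N 1).map (fun _ => 0)
  let st := (PySem.List.pyRange 0 N 1).foldl (teacherStep1 N) (candy, tmp_list)
  (PySem.List.pyRange 0 N 1).foldl (teacherStep2 st.2) st.1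

-- ===== PORT B =====
-- loop body of B's 'for i in range(N)' (state = (candy, carry))
def teacherAltStep (st : List Int × Int) (i : Int) : List Int × Int :=
  let h := PySem.Int.floordiv (PySem.List.pyGetD st.1 i 0 + PySem.Int.mod (PySem.List.pyGetD st.1 i 0) 2) 2
  (PySem.List.pySetD st.1 i (h + st.2), h)

def teacher_alt (N : Int) (candy : List Int) : List Int :=
  if N ≤ 0 then candy
  else
    let z := PySem.List.pyGetD candy (N - 1) 0
    let carry := PySem.Int.floordiv (z + PySem.Int.mod z 2) 2
    ((PySem.List.pyRange 0 N 1).foldl teacherAltStep (candy, carry)).1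

-- ===== PRECONDITION & SPEC =====
-- A raises IndexError when N > len(candy) (candy[idx] on the first loop); those inputs are excluded.
def Pre_teacher (N : Int) (candy : List Int) : Prop := N ≤ (candy.length : Int)
instance (N : Int) (candy : List Int) : Decidable (Pre_teacher N candy) := by unfold Pre_teacher; infer_instance
def pvWitness_teacher : Int × List Int := (3, [1, 2, 3])

def Spec_teacher (N : Int) (candy : List Int) (out : List Int) : Prop := out = teacher_alt N candy
instance (N : Int) (candy : List Int) (out : List Int) : Decidable (Spec_teacher N candy out) := by unfold Spec_teacher; infer_instance

-- ===== CLAIM (what is proved, stated in full; the proofs are below) =====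
def Claim_equal_teacher : Prop := ∀ (N : Int) (candy : List Int), Dom_teacher N candy → Pre_teacher N candy → Spec_teacher N candy (teacher N candy)

-- ===== LEMMAS AND PROOFS =====

-- rounded-up half, the value both programs compute per student
def ceil2 (c : Int) : Int := PySem.Int.floordiv (c + PySem.Int.mod c 2) 2

-- normal form of A's first loop body at an in-range nonnegative index
theorem teacherStep1_norm (N : Int) (l t : List Int) (idx : Nat) (h : idx < l.length) :
    teacherStep1 N (l, t) (idx : Int)
      = (PySem.List.pySetD l (idx : Int) (ceil2 l[idx]),
         PySem.List.pySetD t (PySem.Int.mod ((idx : Int) + 1) N) (ceil2 l[idx])) := by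
  unfold teacherStep1 ceil2
  rcases Int.emod_two_eq l[idx] with hm | hm
  · simp [List.getD_eq_getElem?_getD, List.getElem?_eq_getElem h, hm]
  · simp [List.getD_eq_getElem?_getD, List.getElem?_eq_getElem h, hm,
      List.getElem?_set_self, List.set_set, h]

theorem set_len_append (pre : List Int) (x v : Int) (rest : List Int) :
    (pre ++ x :: rest).set pre.length v = pre ++ v :: rest := by
  simp

theorem get_len_append (pre : List Int) (x : Int) (rest : List Int) :
    (pre ++ x :: rest)[pre.length]'(by simp) = x := by
  simp

theorem getD_len_append (pre : List Int) (x : Int) (rest : List Int) :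
    (pre ++ x :: rest).getD pre.length 0 = x := by
  simp [List.getD_eq_getElem?_getD]

-- A's first loop over a segment whose tmp writes stay below N (no wrap)
theorem fold1seg (N : Int) (hN : 0 < N) :
    ∀ (mid : List Int) (pre post tpre tmid tpost : List Int),
    (pre.length : Int) + (mid.length : Int) < N →
    tpre.length = pre.length + 1 →
    tmid.length = mid.length →
    List.foldl (teacherStep1 N) (pre ++ mid ++ post, tpre ++ tmid ++ tpost)
      (PySem.List.pyRange (pre.length : Int) ((pre.length : Int) + (mid.length : Int)) 1)
    = (pre ++ mid.map ceil2 ++ post, tpre ++ mid.map ceil2 ++ tpost)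
  | [], pre, post, tpre, tmid, tpost, hlt, htpre, htmid => by
    have : tmid = [] := List.eq_nil_of_length_eq_zero htmid
    subst this
    simp [PySem.List.pyRange_one_eq_nil (by omega : (pre.length : Int) + 0 ≤ pre.length)]
  | m :: mid', pre, post, tpre, tmid, tpost, hlt, htpre, htmid => by
    obtain ⟨u, tmid', rfl⟩ : ∃ u t', tmid = u :: t' := by
      cases tmid with
      | nil => simp at htmid
      | cons a b => exact ⟨a, b, rfl⟩
    have hab : (pre.length : Int) < (pre.length : Int) + ((m :: mid').length : Int) := by
      simp only [List.length_cons]; push_cast; omega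
    rw [PySem.List.pyRange_one_cons hab]
    rw [List.foldl_cons]
    rw [show pre ++ (m :: mid') ++ post = pre ++ m :: (mid' ++ post) by simp]
    rw [teacherStep1_norm N _ _ pre.length (by simp)]
    rw [get_len_append]
    have hub : (pre.length : Int) + 1 < N := by
      simp only [List.length_cons] at hlt; push_cast at hlt; omega
    have hmod : PySem.Int.mod ((pre.length : Int) + 1) N = (pre.length : Int) + 1 := by
      rw [PySem.Int.mod_eq_emod_of_pos hN]; exact Int.emod_eq_of_lt (by omega) hub
    rw [hmod]
    rw [PySem.List.pySetD_natCast, set_len_append]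
    have hset2 : PySem.List.pySetD (tpre ++ (u :: (tmid' ++ tpost))) ((pre.length : Int) + 1) (ceil2 m)
        = tpre ++ (ceil2 m) :: (tmid' ++ tpost) := by
      rw [show ((pre.length : Int) + 1) = ((tpre.length : Nat) : Int) by push_cast; omega]
      rw [PySem.List.pySetD_natCast, set_len_append]
    rw [show tpre ++ (u :: tmid') ++ tpost = tpre ++ (u :: (tmid' ++ tpost)) by simp, hset2]
    have hlt' : ((pre.length : Int) + 1) + (mid'.length : Int) < N := by simp only [List.length_cons] at hlt; push_cast at hlt; omega
    have IH := fold1seg N hN mid' (pre ++ [ceil2 m]) post (tpre ++ [ceil2 m]) tmid' tpost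
      (by simpa using hlt') (by simp [htpre]) (by simpa using htmid)
    rw [show (pre ++ [ceil2 m]) ++ mid' ++ post = pre ++ (ceil2 m) :: (mid' ++ post) by simp] at IH
    rw [show (tpre ++ [ceil2 m]) ++ tmid' ++ tpost = tpre ++ (ceil2 m) :: (tmid' ++ tpost) by simp] at IH
    rw [show (((pre ++ [ceil2 m]).length : Nat) : Int) = (pre.length : Int) + 1 by simp only [List.length_append, List.length_cons, List.length_nil]; push_cast; omega] at IH
    rw [show ((pre.length : Int) + 1 + (mid'.length : Int)) = (pre.length : Int) + ((m :: mid').length : Int) by simp only [List.length_append, List.length_cons, List.length_nil]; push_cast; omega] at IH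
    rw [IH]
    simp

-- A's second loop over a segment: pointwise addition with the tmp segment
theorem fold2seg (tpost : List Int) :
    ∀ (mid tmid : List Int) (pre post tpre : List Int),
    tpre.length = pre.length →
    tmid.length = mid.length →
    List.foldl (teacherStep2 (tpre ++ tmid ++ tpost)) (pre ++ mid ++ post)
      (PySem.List.pyRange (pre.length : Int) ((pre.length : Int) + (mid.length : Int)) 1)
    = pre ++ List.zipWith (· + ·) mid tmid ++ post
  | [], tmid, pre, post, tpre, htpre, htmid => by
    have : tmid = [] := List.eq_nil_of_length_eq_zero htmid
    subst this
    simp [PySem.List.pyRange_one_eq_nil (by omega : (pre.length : Int) + 0 ≤ pre.length)]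
  | m :: mid', tmid, pre, post, tpre, htpre, htmid => by
    obtain ⟨u, tmid', rfl⟩ : ∃ u t', tmid = u :: t' := by
      cases tmid with
      | nil => simp at htmid
      | cons a b => exact ⟨a, b, rfl⟩
    have hab : (pre.length : Int) < (pre.length : Int) + ((m :: mid').length : Int) := by
      simp only [List.length_cons]; push_cast; omega
    rw [PySem.List.pyRange_one_cons hab, List.foldl_cons]
    have hstep : teacherStep2 (tpre ++ (u :: tmid') ++ tpost) (pre ++ (m :: mid') ++ post) (pre.length : Int)
        = pre ++ (m + u) :: (mid' ++ post) := by
      unfold teacherStep2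
      rw [show pre ++ (m :: mid') ++ post = pre ++ m :: (mid' ++ post) by simp]
      rw [show tpre ++ (u :: tmid') ++ tpost = tpre ++ u :: (tmid' ++ tpost) by simp]
      rw [PySem.List.pySetD_natCast]
      simp only [PySem.List.pyGetD_natCast]
      rw [getD_len_append]
      rw [show tpre ++ u :: (tmid' ++ tpost) = tpre ++ u :: (tmid' ++ tpost) by rfl]
      rw [show ((pre.length : Nat)) = tpre.length by omega]
      rw [getD_len_append]
      rw [show tpre.length = pre.length by omega, set_len_append]
    rw [hstep]
    have IH := fold2seg tpost mid' tmid' (pre ++ [m + u]) post (tpre ++ [u])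
      (by simp [htpre]) (by simpa using htmid)
    rw [show (pre ++ [m + u]) ++ mid' ++ post = pre ++ (m + u) :: (mid' ++ post) by simp] at IH
    rw [show (tpre ++ [u]) ++ tmid' ++ tpost = tpre ++ (u :: tmid') ++ tpost by simp] at IH
    rw [show (((pre ++ [m + u]).length : Nat) : Int) = (pre.length : Int) + 1 by
      simp only [List.length_append, List.length_cons, List.length_nil]; push_cast; omega] at IH
    rw [show ((pre.length : Int) + 1 + (mid'.length : Int)) = (pre.length : Int) + ((m :: mid').length : Int) by
      simp only [List.length_cons]; push_cast; omega] at IH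
    rw [IH]
    simp

-- B's carry loop over a segment: each cell becomes its rounded half plus the incoming carry
theorem foldCseg :
    ∀ (mid pre post : List Int) (c : Int),
    List.foldl teacherAltStep (pre ++ mid ++ post, c)
      (PySem.List.pyRange (pre.length : Int) ((pre.length : Int) + (mid.length : Int)) 1)
    = (pre ++ List.zipWith (· + ·) (mid.map ceil2) (c :: mid.map ceil2) ++ post,
       (mid.map ceil2).getLastD c)
  | [], pre, post, c => by
    simp [PySem.List.pyRange_one_eq_nil (by omega : (pre.length : Int) + 0 ≤ pre.length)]
  | m :: mid', pre, post, c => by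
    have hab : (pre.length : Int) < (pre.length : Int) + ((m :: mid').length : Int) := by
      simp only [List.length_cons]; push_cast; omega
    rw [PySem.List.pyRange_one_cons hab, List.foldl_cons]
    have hstep : teacherAltStep (pre ++ (m :: mid') ++ post, c) (pre.length : Int)
        = (pre ++ (ceil2 m + c) :: (mid' ++ post), ceil2 m) := by
      unfold teacherAltStep ceil2
      rw [show pre ++ (m :: mid') ++ post = pre ++ m :: (mid' ++ post) by simp]
      simp only [PySem.List.pyGetD_natCast, getD_len_append]
      rw [PySem.List.pySetD_natCast, set_len_append]
    rw [hstep]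
    have IH := foldCseg mid' (pre ++ [ceil2 m + c]) post (ceil2 m)
    rw [show (pre ++ [ceil2 m + c]) ++ mid' ++ post = pre ++ (ceil2 m + c) :: (mid' ++ post) by simp] at IH
    rw [show (((pre ++ [ceil2 m + c]).length : Nat) : Int) = (pre.length : Int) + 1 by
      simp only [List.length_append, List.length_cons, List.length_nil]; push_cast; omega] at IH
    rw [show ((pre.length : Int) + 1 + (mid'.length : Int)) = (pre.length : Int) + ((m :: mid').length : Int) by
      simp only [List.length_cons]; push_cast; omega] at IH
    rw [IH, List.map_cons, List.zipWith_cons_cons, List.getLastD_cons]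
    simp

-- zipWith only reads a prefix of its second argument
theorem zipWith_prefix :
    ∀ (l l1 l2 : List Int), l.length ≤ l1.length →
    List.zipWith (· + ·) l (l1 ++ l2) = List.zipWith (· + ·) l l1
  | [], _, _, _ => by simp
  | a :: l, [], l2, h => by simp at h
  | a :: l, b :: l1, l2, h => by
    simp only [List.cons_append, List.zipWith_cons_cons]
    rw [zipWith_prefix l l1 l2 (by simpa using h)]

-- A and B agree on every admitted input
theorem main (N : Int) (candy : List Int) (hpre : N ≤ (candy.length : Int)) :
    teacher N candy = teacher_alt N candy := by
  rcases (by omega : N ≤ 0 ∨ 0 < N) with hN | hN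
  · simp [teacher, teacher_alt, hN, PySem.List.pyRange_one_eq_nil hN]
  -- 0 < N
  obtain ⟨n, hNn⟩ : ∃ n : Nat, (n : Int) = N := ⟨N.toNat, Int.toNat_of_nonneg (by omega)⟩
  have hn1 : 1 ≤ n := by omega
  have hnlen : n ≤ candy.length := by exact_mod_cast hNn ▸ hpre
  have hidx : n - 1 < candy.length := by omega
  set M : List Int := candy.take (n - 1) with hMdef
  set z : Int := candy[n - 1] with hzdef
  set R : List Int := candy.drop n with hRdef
  have hM : M.length = n - 1 := by simp [hMdef]; omega
  have htake : candy.take n = M ++ [z] := by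
    rw [show n = (n-1)+1 by omega, List.take_succ]
    simp [hMdef, hzdef, List.getElem?_eq_getElem hidx]
  have hsplit : candy = M ++ z :: R := by
    conv_lhs => rw [← List.take_append_drop n candy]
    rw [htake, hRdef]; simp
  -- the two pointwise-half lists
  set H : List Int := M.map ceil2 ++ [ceil2 z] with hHdef
  set T : List Int := ceil2 z :: M.map ceil2 with hTdef
  -- initial tmp_list
  have htmp0 : (PySem.List.pyRange 0 N 1).map (fun _ => (0:Int)) = [0] ++ List.replicate (n-1) 0 ++ [] := by
    rw [List.map_const']
    rw [show ((PySem.List.pyRange 0 N 1).length) = n by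
      rw [PySem.List.length_pyRange_one]; omega]
    rw [show n = (n-1)+1 by omega, List.replicate_succ]
    simp
  -- split the range at N-1
  have hrsplit : PySem.List.pyRange 0 N 1 = PySem.List.pyRange 0 (N-1) 1 ++ [N-1] := by
    rw [PySem.List.pyRange_one_append 0 (N-1) N (by omega) (by omega)]
    rw [PySem.List.pyRange_one_cons (by omega : N - 1 < N)]
    rw [PySem.List.pyRange_one_eq_nil (by omega : N ≤ N - 1 + 1)]
  -- first loop of A
  have h1 : (PySem.List.pyRange 0 N 1).foldl (teacherStep1 N)
        (candy, (PySem.List.pyRange 0 N 1).map (fun _ => (0:Int)))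
      = (M.map ceil2 ++ ceil2 z :: R, T) := by
    conv_lhs => rw [htmp0, hsplit, hrsplit]
    rw [List.foldl_append]
    have hseg := fold1seg N hN M [] (z :: R) [0] (List.replicate (n-1) 0) []
      (by simp [hM]; omega) (by simp) (by simp [hM])
    rw [show (([] : List Int).length : Int) = 0 by simp] at hseg
    rw [show ((0:Int) + (M.length : Int)) = N - 1 by rw [hM]; push_cast; omega] at hseg
    simp only [List.nil_append] at hseg
    rw [hseg]
    -- last iteration idx = N - 1
    simp only [List.foldl_cons, List.foldl_nil]
    rw [show (N - 1) = (((M.map ceil2).length : Nat) : Int) by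
      simp only [List.length_map, hM]; push_cast; omega]
    rw [teacherStep1_norm N _ _ (M.map ceil2).length (by simp)]
    rw [get_len_append]
    rw [PySem.List.pySetD_natCast, set_len_append]
    rw [show PySem.Int.mod ((((M.map ceil2).length : Nat) : Int) + 1) N = 0 by
      rw [show ((((M.map ceil2).length : Nat) : Int) + 1) = N by
        simp only [List.length_map, hM]; push_cast; omega]
      rw [PySem.Int.mod_eq_emod_of_pos hN]; simp]
    rw [show ([(0:Int)] ++ M.map ceil2 ++ []) = 0 :: M.map ceil2 by simp]
    rw [show (0:Int) = ((0:Nat):Int) by simp, PySem.List.pySetD_natCast]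
    simp [hTdef]
  -- second loop of A
  have h2 : (PySem.List.pyRange 0 N 1).foldl (teacherStep2 T) (M.map ceil2 ++ ceil2 z :: R)
      = List.zipWith (· + ·) H T ++ R := by
    have hseg := fold2seg [] (H) (T) [] R []
      (by simp) (by simp [hHdef, hTdef, hM])
    rw [show (([] : List Int).length : Int) = 0 by simp] at hseg
    rw [show ((0:Int) + (H.length : Int)) = N by simp [hHdef, hM]; push_cast; omega] at hseg
    simp only [List.nil_append, List.append_nil] at hseg
    rw [show M.map ceil2 ++ ceil2 z :: R = H ++ R by simp [hHdef]]
    rw [hseg]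
  -- B's primed carry is ceil2 z
  have hcarry : PySem.List.pyGetD candy (N - 1) 0 = z := by
    rw [show N - 1 = (((n - 1 : Nat)) : Int) by push_cast; omega, PySem.List.pyGetD_natCast]
    conv_lhs => rw [hsplit]
    rw [show ((n - 1 : Nat)) = M.length by omega, getD_len_append]
  -- B's single carry pass
  have hB : teacher_alt N candy = List.zipWith (· + ·) H T ++ R := by
    unfold teacher_alt
    rw [if_neg (by omega : ¬ N ≤ 0)]
    simp only [hcarry]
    have hc : PySem.Int.floordiv (z + PySem.Int.mod z 2) 2 = ceil2 z := rfl
    rw [hc]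
    have hseg := foldCseg (M ++ [z]) [] R (ceil2 z)
    rw [show (([] : List Int).length : Int) = 0 by simp] at hseg
    rw [show ((0:Int) + ((M ++ [z]).length : Int)) = N by simp [hM]; push_cast; omega] at hseg
    simp only [List.nil_append] at hseg
    rw [show candy = (M ++ [z]) ++ R by rw [hsplit]; simp]
    rw [hseg]
    -- the produced segment is zipWith (+) H T
    show List.zipWith (· + ·) ((M ++ [z]).map ceil2) (ceil2 z :: (M ++ [z]).map ceil2) ++ R
        = List.zipWith (· + ·) H T ++ R
    rw [show (M ++ [z]).map ceil2 = H by simp [hHdef]]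
    rw [show ceil2 z :: H = T ++ [ceil2 z] by simp [hHdef, hTdef]]
    rw [zipWith_prefix H T [ceil2 z] (by simp [hHdef, hTdef, hM])]
  simp only [teacher]
  rw [h1, h2, hB]

-- ===== VERDICT (by name: the statement is the Claim_ definition above) =====
theorem teacher_spec : Claim_equal_teacher := by
  intro N candy _ hpre
  exact main N candy hpre
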